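-- pv_equiv track=rewrite | github.com/Cheryl73/Image_code_YuChen | data_tree.py | treat_name
-- ===== SOURCE A (Python) =====
-- def treat_name(key):
--     syb = []
--     num = []
--     cur = ''
--     digit = False
--     for s in key:
--         if s.isdigit():
--             if digit:
--                 cur += s
--             else:
--                 syb.append(cur)
--                 digit = True
--                 cur = s
--         else:
--             if digit:
--                 cur = str(int(cur))
--                 num.append(cur)
--                 digit = False
--                 cur = s
--             else:
--                 cur += s
--     if digit:
--         cur = str(int(cur))
--         num.append(cur)
--     return syb, num
-- ===== SOURCE B (Python) =====
-- def treat_name(key):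
--     # split key into maximal runs of same digit-ness, then process runs
--     runs = []
--     i, n = 0, len(key)
--     while i < n:
--         d = key[i].isdigit()
--         j = i + 1
--         while j < n and key[j].isdigit() == d:
--             j += 1
--         runs.append((d, key[i:j]))
--         i = j
--     syb, num = [], []
--     pending = ''
--     for d, run in runs:
--         if d:
--             syb.append(pending)
--             num.append(str(int(run)))
--             pending = ''
--         else:
--             pending = run
--     return syb, num
-- ===== Notes on version B (the rewrite author's own statement) =====
-- stated objective: alternative
-- what changed: A's single char-by-char state machine with a digit flag and a shared growing buffer is replaced by two phases: first split the key into maximal runs of equal digit-ness, then a simple fold over the runs that keeps only a pending symbol.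
import Mathlib
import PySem

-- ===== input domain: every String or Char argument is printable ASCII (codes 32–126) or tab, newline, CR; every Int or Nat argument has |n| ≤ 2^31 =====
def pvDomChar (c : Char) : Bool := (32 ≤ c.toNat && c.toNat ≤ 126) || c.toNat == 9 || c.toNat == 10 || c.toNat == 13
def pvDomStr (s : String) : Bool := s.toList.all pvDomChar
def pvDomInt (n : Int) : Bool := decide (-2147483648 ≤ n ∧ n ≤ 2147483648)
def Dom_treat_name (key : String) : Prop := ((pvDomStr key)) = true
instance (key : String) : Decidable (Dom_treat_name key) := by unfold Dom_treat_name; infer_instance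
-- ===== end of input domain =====

-- B replaces A's char-by-char state machine by a split-into-maximal-runs pass followed by a
-- simple fold over the runs (objective: alternative decomposition, same cost).

-- shared helpers (both Pythons use c.isdigit() and str(int(run)) on the same values):
-- s.isdigit() for a single char: exact on the ASCII domain, where Python digits are exactly '0'..'9'
def pyIsDigit (c : Char) : Bool := c.isDigit
-- str(int(cs)): cs is always a nonempty run of ASCII digits here, so int() cannot raise;
-- the getD 0 default is never reached
def pyStrInt (cs : List Char) : String := PySem.Int.toStr ((PySem.Int.ofStr? (String.ofList cs)).getD 0)

-- ===== PORT A =====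
-- state = (syb, num, cur, digit), exactly A's four variables; one step per character
def aStep (st : List String × List String × List Char × Bool) (c : Char) :
    List String × List String × List Char × Bool :=
  let (syb, num, cur, digit) := st
  if pyIsDigit c then
    if digit then (syb, num, cur ++ [c], true)
    else (syb ++ [String.ofList cur], num, [c], true)
  else
    if digit then (syb, num ++ [pyStrInt cur], [c], false)
    else (syb, num, cur ++ [c], false)

def treat_name (key : String) : List String × List String :=
  let st := key.toList.foldl aStep ([], [], [], false)
  if st.2.2.2 then (st.1, st.2.1 ++ [pyStrInt st.2.2.1]) else (st.1, st.2.1)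

-- ===== PORT B =====
-- split into maximal runs of equal digit-ness (Source B's while-loops with key[i:j])
def bRuns : List Char → List (Bool × List Char)
  | [] => []
  | c :: cs =>
    (pyIsDigit c, c :: cs.takeWhile (fun d => pyIsDigit d == pyIsDigit c)) ::
      bRuns (cs.dropWhile (fun d => pyIsDigit d == pyIsDigit c))
  termination_by l => l.length
  decreasing_by exact Nat.lt_succ_of_le (List.length_dropWhile_le _ _)

-- state = (pending, syb, num), exactly Source B's loop over runs
def bStep (st : List Char × List String × List String) (r : Bool × List Char) :
    List Char × List String × List String :=
  let (pending, syb, num) := st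
  if r.1 then ([], syb ++ [String.ofList pending], num ++ [pyStrInt r.2])
  else (r.2, syb, num)

def treat_name_alt (key : String) : List String × List String :=
  let st := (bRuns key.toList).foldl bStep ([], [], [])
  (st.2.1, st.2.2)

-- ===== PRECONDITION & SPEC =====
def Spec_treat_name (key : String) (out : List String × List String) : Prop := out = treat_name_alt key
instance (key : String) (out : List String × List String) : Decidable (Spec_treat_name key out) := by unfold Spec_treat_name; infer_instance

-- ===== CLAIM (what is proved, stated in full; the proofs are below) =====
def Claim_equal_treat_name : Prop := ∀ (key : String), Dom_treat_name key → Spec_treat_name key (treat_name key)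

-- ===== LEMMAS AND PROOFS =====

-- A's final fix-up applied to a loop state
def aFin (st : List String × List String × List Char × Bool) : List String × List String :=
  if st.2.2.2 then (st.1, st.2.1 ++ [pyStrInt st.2.2.1]) else (st.1, st.2.1)

theorem head_dropWhile_not {α : Type} (p : α → Bool) (l : List α) :
    ∀ c cs, l.dropWhile p = c :: cs → p c = false := by
  induction l with
  | nil => intro c cs h; simp [List.dropWhile] at h
  | cons a l ih =>
    intro c cs h
    by_cases hp : p a = true
    · exact ih c cs (by simpa [List.dropWhile, hp] using h)
    · simp [List.dropWhile, hp] at h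
      simp [← h.1]; simpa using hp

-- folding A's step over a run of non-digits just extends cur
theorem aFold_nondigit (r : List Char) :
    ∀ syb num cur, (∀ c ∈ r, pyIsDigit c = false) →
      r.foldl aStep (syb, num, cur, false) = (syb, num, cur ++ r, false) := by
  induction r with
  | nil => intro syb num cur _; simp
  | cons c r ih =>
    intro syb num cur h
    have hc : pyIsDigit c = false := h c (by simp)
    simp only [List.foldl_cons, aStep, hc]
    simpa using ih syb num (cur ++ [c]) (fun d hd => h d (by simp [hd]))

-- folding A's step over a run of digits just extends cur
theorem aFold_digit (r : List Char) :
    ∀ syb num cur, (∀ c ∈ r, pyIsDigit c = true) →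
      r.foldl aStep (syb, num, cur, true) = (syb, num, cur ++ r, true) := by
  induction r with
  | nil => intro syb num cur _; simp
  | cons c r ih =>
    intro syb num cur h
    have hc : pyIsDigit c = true := h c (by simp)
    simp only [List.foldl_cons, aStep, hc]
    simpa using ih syb num (cur ++ [c]) (fun d hd => h d (by simp [hd]))

-- main invariant: from a non-digit state whose cur is empty unless the rest starts with a digit,
-- A's loop plus fix-up computes exactly B's fold over the runs of the rest
theorem main_inv : ∀ (n : Nat) (l : List Char), l.length ≤ n →
    ∀ (syb num : List String) (p : List Char),
      (∀ c cs, l = c :: cs → pyIsDigit c = false → p = []) →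
      aFin (l.foldl aStep (syb, num, p, false)) =
        (((bRuns l).foldl bStep (p, syb, num)).2.1, ((bRuns l).foldl bStep (p, syb, num)).2.2) := by
  intro n
  induction n with
  | zero =>
    intro l hl syb num p _
    have : l = [] := List.length_eq_zero_iff.mp (Nat.le_zero.mp hl)
    subst this; simp [bRuns, aFin]
  | succ n ih =>
    intro l hl syb num p hp
    match l with
    | [] => simp [bRuns, aFin]
    | c :: cs =>
      set r := cs.takeWhile (fun d => pyIsDigit d == pyIsDigit c) with hr
      set rest := cs.dropWhile (fun d => pyIsDigit d == pyIsDigit c) with hrest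
      have hsplit : r ++ rest = cs := List.takeWhile_append_dropWhile
      have hmem : ∀ d ∈ r, pyIsDigit d = pyIsDigit c := by
        intro d hd
        have := List.mem_takeWhile_imp (hr ▸ hd)
        simpa using this
      have hrestlen : rest.length ≤ n := by
        have h1 : rest.length ≤ cs.length := hrest ▸ List.length_dropWhile_le _ _
        have h2 : cs.length + 1 ≤ n + 1 := by simpa using hl
        omega
      have hhead : ∀ a as, rest = a :: as → (pyIsDigit a == pyIsDigit c) = false := by
        intro a as h
        exact head_dropWhile_not _ cs a as (hrest.symm.trans h)
      have hrunl : bRuns (c :: cs) = (pyIsDigit c, c :: r) :: bRuns rest := by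
        rw [bRuns]
      have hfold : (c :: cs).foldl aStep (syb, num, p, false) =
          rest.foldl aStep ((r.foldl aStep (aStep (syb, num, p, false) c))) := by
        conv_lhs => rw [show c :: cs = (c :: r) ++ rest by rw [← hsplit]; simp]
        simp [List.foldl_append]
      clear_value r rest
      clear hr hrest
      by_cases hc : pyIsDigit c = true
      · -- digit run: A pushes cur to syb, accumulates the digits
        have hstep : aStep (syb, num, p, false) c = (syb ++ [String.ofList p], num, [c], true) := by
          simp [aStep, hc]
        have hdig : r.foldl aStep (syb ++ [String.ofList p], num, [c], true) =
            (syb ++ [String.ofList p], num, c :: r, true) :=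
          aFold_digit r _ _ _ (fun d hd => by rw [hmem d hd]; exact hc)
        rw [hfold, hstep, hdig, hrunl]
        simp only [List.foldl_cons]
        have hbstep : bStep (p, syb, num) (pyIsDigit c, c :: r) =
            ([], syb ++ [String.ofList p], num ++ [pyStrInt (c :: r)]) := by
          simp [bStep, hc]
        rw [hbstep]
        -- now the remaining chars: either nothing, or a non-digit run begins
        match rest, hrestlen, hhead with
        | [], _, _ => simp [bRuns, aFin]
        | c' :: cs', hrestlen, hhead =>
          have hc' : pyIsDigit c' = false := by
            have := hhead c' cs' rfl
            simp [hc] at this; exact this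
          set r' := cs'.takeWhile (fun d => pyIsDigit d == pyIsDigit c') with hr'
          set rest' := cs'.dropWhile (fun d => pyIsDigit d == pyIsDigit c') with hrest'
          have hsplit' : r' ++ rest' = cs' := List.takeWhile_append_dropWhile
          have hmem' : ∀ d ∈ r', pyIsDigit d = pyIsDigit c' := by
            intro d hd
            have := List.mem_takeWhile_imp (hr' ▸ hd)
            simpa using this
          have hlen' : rest'.length ≤ n := by
            have h1 : rest'.length ≤ cs'.length := hrest' ▸ List.length_dropWhile_le _ _
            have h2 : (c' :: cs').length ≤ n := hrestlen
            simp at h2; omega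
          have hhead' : ∀ a as, rest' = a :: as → (pyIsDigit a == pyIsDigit c') = false := by
            intro a as h
            exact head_dropWhile_not _ cs' a as (hrest'.symm.trans h)
          have hrunl' : bRuns (c' :: cs') = (pyIsDigit c', c' :: r') :: bRuns rest' := by
            rw [bRuns]
          have hfold' : (c' :: cs').foldl aStep (syb ++ [String.ofList p], num, c :: r, true) =
              rest'.foldl aStep (r'.foldl aStep (aStep (syb ++ [String.ofList p], num, c :: r, true) c')) := by
            conv_lhs => rw [show c' :: cs' = (c' :: r') ++ rest' by rw [← hsplit']; simp]
            simp [List.foldl_append]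
          clear_value r' rest'
          clear hr' hrest'
          have hstep' : aStep (syb ++ [String.ofList p], num, c :: r, true) c' =
              (syb ++ [String.ofList p], num ++ [pyStrInt (c :: r)], [c'], false) := by
            simp [aStep, hc']
          have hnon : r'.foldl aStep (syb ++ [String.ofList p], num ++ [pyStrInt (c :: r)], [c'], false) =
              (syb ++ [String.ofList p], num ++ [pyStrInt (c :: r)], c' :: r', false) :=
            aFold_nondigit r' _ _ _ (fun d hd => by rw [hmem' d hd]; exact hc')
          rw [hfold', hstep', hnon]
          have hp' : ∀ a as, rest' = a :: as → pyIsDigit a = false → (c' :: r') = ([] : List Char) := by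
            intro a as ha hfa
            have := hhead' a as ha
            simp [hc'] at this
            exact absurd hfa (by simp [this])
          rw [ih rest' hlen' (syb ++ [String.ofList p]) (num ++ [pyStrInt (c :: r)]) (c' :: r') hp', hrunl']
          simp only [List.foldl_cons]
          have : bStep ([], syb ++ [String.ofList p], num ++ [pyStrInt (c :: r)]) (pyIsDigit c', c' :: r') =
              (c' :: r', syb ++ [String.ofList p], num ++ [pyStrInt (c :: r)]) := by
            simp [bStep, hc']
          rw [this]
      · -- non-digit run: by hp, p = [], A extends cur across the run, B sets pending to the run
        have hc0 : pyIsDigit c = false := by simpa using hc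
        have hpnil : p = [] := hp c cs rfl hc0
        subst hpnil
        have hstep : aStep (syb, num, ([] : List Char), false) c = (syb, num, [c], false) := by
          simp [aStep, hc0]
        have hnon : r.foldl aStep (syb, num, [c], false) = (syb, num, c :: r, false) :=
          aFold_nondigit r _ _ _ (fun d hd => by rw [hmem d hd]; exact hc0)
        rw [hfold, hstep, hnon]
        have hp' : ∀ a as, rest = a :: as → pyIsDigit a = false → (c :: r) = ([] : List Char) := by
          intro a as ha hfa
          have := hhead a as ha
          simp [hc0] at this
          exact absurd hfa (by simp [this])
        rw [ih rest hrestlen syb num (c :: r) hp', hrunl]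
        simp only [List.foldl_cons]
        have : bStep (([] : List Char), syb, num) (pyIsDigit c, c :: r) = (c :: r, syb, num) := by
          simp [bStep, hc0]
        rw [this]

-- ===== VERDICT (by name: the statement is the Claim_ definition above) =====
theorem treat_name_spec : Claim_equal_treat_name := by
  intro key _
  unfold Spec_treat_name treat_name treat_name_alt
  have := main_inv key.toList.length key.toList le_rfl [] [] [] (by intro c cs _ _; rfl)
  simpa [aFin] using this
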